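-- pv_equiv track=rewrite | github.com/miniongo3o/TIL | programmers/1018.py | solution
-- ===== SOURCE A (Python) =====
-- def solution(S):
--     dic = {}
--     for i in range(len(S)):
--         temp_list = list(S[i])
--         for j in range(len(temp_list)):
--             if j not in dic:
--                 dic[j] = [temp_list[j]]
--             else:
--                 if temp_list[j] in dic[j]:
--                     target = dic[j].index(temp_list[j])
--                     return [target, i, j]
--                 dic[j].append(temp_list[j])
--     return []
-- ===== SOURCE B (Python) =====
-- def solution(S):
--     if not S:
--         return []
--     width = max(len(s) for s in S)
--     best = None  # (repeat_row, col, first_pos_in_column)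
--     for j in range(width):
--         seen = {}  # char -> position among rows that have column j
--         pos = 0
--         for i, s in enumerate(S):
--             if j < len(s):
--                 c = s[j]
--                 if c in seen:
--                     if best is None or i < best[0]:
--                         best = (i, j, seen[c])
--                     break
--                 seen[c] = pos
--                 pos += 1
--     if best is None:
--         return []
--     i, j, t = best
--     return [t, i, j]
-- ===== Notes on version B (the rewrite author's own statement) =====
-- stated objective: alternative
-- what changed: A's single row-major pass with an early return and incrementally grown per-column lists (membership + list.index scans) is replaced by independent column-major scans, each using a char-to-first-position dict, followed by a min-over-columns selection of the earliest repeat row.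
import Mathlib
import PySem

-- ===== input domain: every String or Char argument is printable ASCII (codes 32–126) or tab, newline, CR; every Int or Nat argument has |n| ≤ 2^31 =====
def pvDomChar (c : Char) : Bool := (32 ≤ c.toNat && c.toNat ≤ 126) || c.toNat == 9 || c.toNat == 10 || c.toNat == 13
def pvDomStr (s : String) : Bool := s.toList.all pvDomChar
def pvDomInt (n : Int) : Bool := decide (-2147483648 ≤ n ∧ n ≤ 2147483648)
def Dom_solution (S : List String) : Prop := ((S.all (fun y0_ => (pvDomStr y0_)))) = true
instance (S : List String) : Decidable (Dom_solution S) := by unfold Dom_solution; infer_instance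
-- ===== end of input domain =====

-- B replaces A's row-major early-exit scan (incremental per-column lists with list.index)
-- by independent per-column scans with a char→position dict and a min-selection over columns
-- (objective: alternative decomposition; same exact return value).

-- ===== PORT A =====
-- inner loop over the characters of one row; j is the running column index,
-- dic maps a column index to the list of characters seen in that column so far.
-- `.inr ans` models A's early `return`, `.inl dic` is normal fall-through.
def aRow (i : Int) : PySem.Dict Int (List Char) → Int → List Char →
    (PySem.Dict Int (List Char)) ⊕ (List Int)
  | dic, _, [] => .inl dic
  | dic, j, c :: rest =>
    match dic.get? j with
    | none => aRow i (dic.insert j [c]) (j + 1) rest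
    | some lst =>
      if c ∈ lst then
        -- `dic[j].index(temp_list[j])`: membership is guaranteed by the branch, so getD 0 is exact
        .inr [((PySem.List.index? lst c).getD 0 : Nat), i, j]
      else aRow i (dic.insert j (lst ++ [c])) (j + 1) rest

def aRows : PySem.Dict Int (List Char) → Int → List String → List Int
  | _, _, [] => []
  | dic, i, s :: rest =>
    match aRow i dic 0 s.toList with
    | .inr ans => ans
    | .inl dic' => aRows dic' (i + 1) rest

def solution (S : List String) : List Int := aRows PySem.Dict.empty 0 S

-- ===== PORT B =====
-- scan of one column j over all rows; seen maps a char to its position among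
-- the rows that have column j, pos counts those rows; result = first repeat (row, first position).
def bCol (j : Nat) : List (List Char) → Nat → PySem.Dict Char Nat → Nat → Option (Nat × Nat)
  | [], _, _, _ => none
  | r :: rest, i, seen, pos =>
    match r[j]? with
    | none => bCol j rest (i + 1) seen pos
    | some c =>
      match seen.get? c with
      | some p => some (i, p)
      | none => bCol j rest (i + 1) (seen.insert c pos) (pos + 1)

-- the `best` selection over columns j in range(width)
def bBest (R : List (List Char)) (w : Nat) : Option (Nat × Nat × Nat) :=
  (List.range w).foldl
    (fun best j =>
      match bCol j R 0 PySem.Dict.empty 0 with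
      | none => best
      | some (i, p) =>
        match best with
        | none => some (i, j, p)
        | some (i0, _, _) => if i < i0 then some (i, j, p) else best)
    none

def solution_alt (S : List String) : List Int :=
  match S with
  | [] => []
  | _ :: _ =>
    let R := S.map String.toList
    let w := R.foldl (fun m r => max m r.length) 0
    match bBest R w with
    | none => []
    | some (i, j, p) => [(p : Int), (i : Int), (j : Int)]

-- ===== PRECONDITION & SPEC =====
def Spec_solution (S : List String) (out : List Int) : Prop := out = solution_alt S
instance (S : List String) (out : List Int) : Decidable (Spec_solution S out) := by unfold Spec_solution; infer_instance

-- ===== CLAIM (what is proved, stated in full; the proofs are below) =====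
def Claim_equal_solution : Prop := ∀ (S : List String), Dom_solution S → Spec_solution S (solution S)

-- ===== LEMMAS AND PROOFS =====

-- ---- proof-side notions ----

-- column j of the rows R (rows too short are skipped), as A's dict / B's scan see it
def colF (R : List (List Char)) (j : Nat) : List Char := R.filterMap (fun r => r[j]?)

def cell (R : List (List Char)) (i j : Nat) : Option Char := (R[i]?).bind (fun r => r[j]?)

-- (i, j) is a repeat: the char there already occurs in column j among earlier rows
def Hit (R : List (List Char)) (i j : Nat) : Prop :=
  ∃ c, cell R i j = some c ∧ c ∈ colF (R.take i) j

def myIdx (L : List Char) (c : Char) : Nat := (L.idxOf? c).getD 0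

-- A's dict state as a function of the processed rows
def DicRep (f : Nat → List Char) (dic : PySem.Dict Int (List Char)) : Prop :=
  ∀ z : Int, dic.get? z = if 0 ≤ z ∧ f z.toNat ≠ [] then some (f z.toNat) else none

def rowHit (f : Nat → List Char) : Nat → List Char → Option (Nat × Char)
  | _, [] => none
  | j, c :: rest => if c ∈ f j then some (j, c) else rowHit f (j + 1) rest

def extFrom (f : Nat → List Char) (j0 : Nat) (rest : List Char) : Nat → List Char :=
  fun j => if j0 ≤ j then f j ++ (rest[j - j0]?).toList else f j

-- reference recursion mirroring A with the dict replaced by its functional contents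
def specA (f : Nat → List Char) (i : Int) : List (List Char) → List Int
  | [] => []
  | r :: rest =>
    match rowHit f 0 r with
    | some (j, c) => [(myIdx (f j) c : Int), i, (j : Int)]
    | none => specA (extFrom f 0 r) (i + 1) rest

def IsFirst (R : List (List Char)) (i j : Nat) : Prop :=
  Hit R i j ∧ ∀ i' j', Hit R i' j' → i < i' ∨ (i = i' ∧ j ≤ j')

-- B's seen-dict state
def SeenRep (L : List Char) (seen : PySem.Dict Char Nat) : Prop :=
  ∀ ch, seen.get? ch = L.idxOf? ch

-- ---- basic facts ----

theorem colF_append_singleton (P : List (List Char)) (r : List Char) (j : Nat) :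
    colF (P ++ [r]) j = colF P j ++ (r[j]?).toList := by
  simp only [colF, List.filterMap_append]
  cases h : r[j]? <;> simp [h]

theorem extFrom_zero (f : Nat → List Char) (r : List Char) :
    extFrom f 0 r = fun j => f j ++ (r[j]?).toList := by
  funext j
  simp [extFrom]

theorem extFrom_cons (f : Nat → List Char) (j0 : Nat) (c : Char) (rest : List Char) :
    extFrom f j0 (c :: rest)
      = extFrom (Function.update f j0 (f j0 ++ [c])) (j0 + 1) rest := by
  funext j
  unfold extFrom
  rcases lt_trichotomy j j0 with h | h | h
  · rw [if_neg (by omega), if_neg (by omega), Function.update_of_ne (by omega)]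
  · subst h
    rw [if_pos le_rfl, if_neg (by omega), Function.update_self]
    simp
  · rw [if_pos (by omega), if_pos (by omega), Function.update_of_ne (by omega)]
    have h2 : j - j0 = (j - (j0 + 1)) + 1 := by omega
    rw [h2, List.getElem?_cons_succ]

theorem rowHit_congr (f g : Nat → List Char) (r : List Char) (j0 : Nat)
    (h : ∀ j, j0 ≤ j → f j = g j) : rowHit f j0 r = rowHit g j0 r := by
  revert h
  induction r generalizing j0 with
  | nil => intro h; rfl
  | cons c rest ih =>
    intro h
    have hg := h j0 le_rfl
    simp only [rowHit, hg]
    split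
    · rfl
    · exact ih (j0 + 1) (fun j hj => h j (by omega))

theorem rowHit_none_iff (f : Nat → List Char) (r : List Char) (j0 : Nat) :
    rowHit f j0 r = none ↔ ∀ k c, r[k]? = some c → c ∉ f (j0 + k) := by
  induction r generalizing j0 with
  | nil => simp [rowHit]
  | cons c rest ih =>
    by_cases hm : c ∈ f j0
    · simp only [rowHit, if_pos hm]
      constructor
      · intro h; cases h
      · intro h
        exact absurd hm (by simpa using h 0 c (by simp))
    · simp only [rowHit, if_neg hm]
      rw [ih (j0 + 1)]
      constructor
      · intro h k c' hk
        cases k with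
        | zero =>
          simp only [List.getElem?_cons_zero, Option.some_inj] at hk
          subst hk; simpa using hm
        | succ k =>
          have := h k c' (by simpa using hk)
          have he : j0 + 1 + k = j0 + (k + 1) := by omega
          rw [he] at this; exact this
      · intro h k c' hk
        have := h (k + 1) c' (by simpa using hk)
        have he : j0 + (k + 1) = j0 + 1 + k := by omega
        rw [he] at this; exact this

theorem rowHit_some (f : Nat → List Char) (r : List Char) (j0 j : Nat) (c : Char)
    (h : rowHit f j0 r = some (j, c)) :
    ∃ k, j = j0 + k ∧ r[k]? = some c ∧ c ∈ f (j0 + k) ∧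
      ∀ k' < k, ∀ c', r[k']? = some c' → c' ∉ f (j0 + k') := by
  revert h
  induction r generalizing j0 with
  | nil => intro h; cases h
  | cons c0 rest ih =>
    intro h
    by_cases hm : c0 ∈ f j0
    · simp only [rowHit, if_pos hm, Option.some_inj] at h
      rw [Prod.mk.injEq] at h
      obtain ⟨rfl, rfl⟩ := h
      exact ⟨0, by omega, by simp, by simpa using hm, fun k' hk' => by omega⟩
    · simp only [rowHit, if_neg hm] at h
      obtain ⟨k, hjk, hget, hmem, hmin⟩ := ih (j0 + 1) h
      refine ⟨k + 1, by omega, by simpa using hget, ?_, ?_⟩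
      · have he : j0 + (k + 1) = j0 + 1 + k := by omega
        rw [he]; exact hmem
      · intro k' hk' c' hc'
        cases k' with
        | zero =>
          simp only [List.getElem?_cons_zero, Option.some_inj] at hc'
          subst hc'; simpa using hm
        | succ k'' =>
          have := hmin k'' (by omega) c' (by simpa using hc')
          have he : j0 + (k'' + 1) = j0 + 1 + k'' := by omega
          rw [he]; exact this

theorem DicRep_empty : DicRep (colF []) PySem.Dict.empty := by
  intro z
  simp [colF]

theorem DicRep_update (f : Nat → List Char) (dic : PySem.Dict Int (List Char))
    (hrep : DicRep f dic) (j0 : Nat) (l : List Char) (hl : l ≠ []) :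
    DicRep (Function.update f j0 l) (dic.insert (j0 : Int) l) := by
  intro z
  rw [PySem.Dict.get?_insert]
  by_cases hz : z = (j0 : Int)
  · subst hz
    rw [if_pos rfl, if_pos ⟨Int.natCast_nonneg j0, by simpa [Int.toNat_natCast, Function.update_self] using hl⟩]
    simp [Int.toNat_natCast, Function.update_self]
  · rw [if_neg hz, hrep z]
    by_cases h0 : 0 ≤ z
    · have hne : z.toNat ≠ j0 := fun hEq => hz (by rw [← hEq, Int.toNat_of_nonneg h0])
      rw [Function.update_of_ne hne]
    · rw [if_neg (fun h => h0 h.1), if_neg (fun h => h0 h.1)]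

theorem aRow_nohit (i : Int) (rest : List Char) (j0 : Nat) (f : Nat → List Char)
    (dic : PySem.Dict Int (List Char)) (hrep : DicRep f dic)
    (h : rowHit f j0 rest = none) :
    ∃ dic', aRow i dic (j0 : Int) rest = .inl dic' ∧ DicRep (extFrom f j0 rest) dic' := by
  revert hrep h
  induction rest generalizing j0 f dic with
  | nil =>
    intro hrep _
    refine ⟨dic, rfl, ?_⟩
    have he : extFrom f j0 [] = f := funext fun j => by simp [extFrom]
    rw [he]; exact hrep
  | cons c rest ih =>
    intro hrep h
    have hm : c ∉ f j0 := by
      intro hmem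
      simp [rowHit, if_pos hmem] at h
    have h' : rowHit f (j0 + 1) rest = none := by
      simpa [rowHit, if_neg hm] using h
    have hcast : ((j0 : Int) + 1) = ((j0 + 1 : Nat) : Int) := by push_cast; ring
    have hrh : rowHit (Function.update f j0 (f j0 ++ [c])) (j0 + 1) rest = none := by
      rw [rowHit_congr _ f _ _ (fun j hj => Function.update_of_ne (by omega) _ _)]
      exact h'
    by_cases hf : f j0 = []
    · have hget : dic.get? (j0 : Int) = none := by
        rw [hrep, if_neg]
        simp [Int.toNat_natCast, hf]
      have hrep' : DicRep (Function.update f j0 (f j0 ++ [c])) (dic.insert (j0 : Int) [c]) := by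
        have hupd := DicRep_update f dic hrep j0 [c] (by simp)
        have he : Function.update f j0 [c] = Function.update f j0 (f j0 ++ [c]) := by
          rw [hf]; rfl
        rw [← he]; exact hupd
      simp only [aRow, hget]
      rw [hcast]
      obtain ⟨dic', hd1, hd2⟩ := ih (j0 + 1) _ _ hrep' hrh
      refine ⟨dic', hd1, ?_⟩
      rw [extFrom_cons]; exact hd2
    · have hget : dic.get? (j0 : Int) = some (f j0) := by
        rw [hrep, if_pos ⟨Int.natCast_nonneg j0, by simpa [Int.toNat_natCast] using hf⟩]
        simp [Int.toNat_natCast]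
      have hrep' : DicRep (Function.update f j0 (f j0 ++ [c])) (dic.insert (j0 : Int) (f j0 ++ [c])) :=
        DicRep_update f dic hrep j0 (f j0 ++ [c]) (by simp)
      simp only [aRow, hget, if_neg hm]
      rw [hcast]
      obtain ⟨dic', hd1, hd2⟩ := ih (j0 + 1) _ _ hrep' hrh
      refine ⟨dic', hd1, ?_⟩
      rw [extFrom_cons]; exact hd2

theorem aRow_hit (i : Int) (rest : List Char) (j0 : Nat) (f : Nat → List Char)
    (dic : PySem.Dict Int (List Char)) (hrep : DicRep f dic) (j : Nat) (c : Char)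
    (h : rowHit f j0 rest = some (j, c)) :
    aRow i dic (j0 : Int) rest = .inr [(myIdx (f j) c : Int), i, (j : Int)] := by
  revert hrep h
  induction rest generalizing j0 f dic with
  | nil => intro _ h; cases h
  | cons c0 rest ih =>
    intro hrep h
    by_cases hm : c0 ∈ f j0
    · simp only [rowHit, if_pos hm, Option.some_inj, Prod.mk.injEq] at h
      obtain ⟨rfl, rfl⟩ := h
      have hne : f j0 ≠ [] := List.ne_nil_of_mem hm
      have hget : dic.get? (j0 : Int) = some (f j0) := by
        rw [hrep, if_pos ⟨Int.natCast_nonneg j0, by simpa [Int.toNat_natCast] using hne⟩]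
        simp [Int.toNat_natCast]
      simp only [aRow, hget, if_pos hm]
      simp [myIdx, PySem.List.index?_eq_idxOf?]
    · have h' : rowHit f (j0 + 1) rest = some (j, c) := by
        simpa [rowHit, if_neg hm] using h
      obtain ⟨k, hjk, -, -, -⟩ := rowHit_some f rest (j0 + 1) j c h'
      have hjge : j0 + 1 ≤ j := by omega
      have hcast : ((j0 : Int) + 1) = ((j0 + 1 : Nat) : Int) := by push_cast; ring
      have hrh : rowHit (Function.update f j0 (f j0 ++ [c0])) (j0 + 1) rest = some (j, c) := by
        rw [rowHit_congr _ f _ _ (fun j' hj' => Function.update_of_ne (by omega) _ _)]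
        exact h'
      have hfj : Function.update f j0 (f j0 ++ [c0]) j = f j :=
        Function.update_of_ne (by omega) _ _
      by_cases hf : f j0 = []
      · have hget : dic.get? (j0 : Int) = none := by
          rw [hrep, if_neg]
          simp [Int.toNat_natCast, hf]
        have hrep' : DicRep (Function.update f j0 (f j0 ++ [c0])) (dic.insert (j0 : Int) [c0]) := by
          have hupd := DicRep_update f dic hrep j0 [c0] (by simp)
          have he : Function.update f j0 [c0] = Function.update f j0 (f j0 ++ [c0]) := by
            rw [hf]; rfl
          rw [← he]; exact hupd
        simp only [aRow, hget]
        rw [hcast, ih (j0 + 1) _ _ hrep' hrh, hfj]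
      · have hget : dic.get? (j0 : Int) = some (f j0) := by
          rw [hrep, if_pos ⟨Int.natCast_nonneg j0, by simpa [Int.toNat_natCast] using hf⟩]
          simp [Int.toNat_natCast]
        have hrep' : DicRep (Function.update f j0 (f j0 ++ [c0])) (dic.insert (j0 : Int) (f j0 ++ [c0])) :=
          DicRep_update f dic hrep j0 (f j0 ++ [c0]) (by simp)
        simp only [aRow, hget, if_neg hm]
        rw [hcast, ih (j0 + 1) _ _ hrep' hrh, hfj]

theorem aRows_spec (S : List String) (f : Nat → List Char)
    (dic : PySem.Dict Int (List Char)) (i : Int) (hrep : DicRep f dic) :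
    aRows dic i S = specA f i (S.map String.toList) := by
  revert hrep
  induction S generalizing f dic i with
  | nil => intro _; rfl
  | cons s rest ih =>
    intro hrep
    cases hrh : rowHit f 0 s.toList with
    | none =>
      obtain ⟨dic', hd1, hd2⟩ := aRow_nohit i s.toList 0 f dic hrep hrh
      rw [Nat.cast_zero] at hd1
      simp only [aRows, List.map_cons, specA, hrh, hd1]
      exact ih _ _ _ hd2
    | some p =>
      obtain ⟨j, c⟩ := p
      have hA := aRow_hit i s.toList 0 f dic hrep j c hrh
      rw [Nat.cast_zero] at hA
      simp only [aRows, List.map_cons, specA, hrh, hA]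

theorem cell_prefix (P : List (List Char)) (r : List Char) (t : List (List Char)) (j : Nat) :
    cell (P ++ r :: t) P.length j = r[j]? := by
  unfold cell
  rw [List.getElem?_append_right le_rfl]
  simp

theorem hit_prefix_iff (P : List (List Char)) (r : List Char) (t : List (List Char)) (j : Nat) :
    Hit (P ++ r :: t) P.length j ↔ ∃ c, r[j]? = some c ∧ c ∈ colF P j := by
  unfold Hit
  rw [cell_prefix, List.take_left]

theorem cell_lt (R : List (List Char)) (i j : Nat) (c : Char) (h : cell R i j = some c) :
    i < R.length := by
  unfold cell at h
  cases hR : R[i]? with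
  | none => rw [hR] at h; cases h
  | some r =>
    by_contra hge
    rw [List.getElem?_eq_none (by omega)] at hR
    cases hR

theorem extFrom_colF (P : List (List Char)) (r : List Char) :
    extFrom (colF P) 0 r = colF (P ++ [r]) := by
  rw [extFrom_zero]
  funext j
  rw [colF_append_singleton]

-- characterisation of specA over a prefix
theorem specA_nohit (rest P : List (List Char))
    (h : ∀ k j, ¬ Hit (P ++ rest) (P.length + k) j) :
    specA (colF P) (P.length : Int) rest = [] := by
  revert h
  induction rest generalizing P with
  | nil => intro _; rfl
  | cons r rest ih =>
    intro h
    have hrh : rowHit (colF P) 0 r = none := by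
      rw [rowHit_none_iff]
      intro k c hk hmem
      apply h 0 k
      refine ⟨c, ?_, ?_⟩
      · rw [Nat.add_zero, cell_prefix]; exact hk
      · rw [Nat.add_zero, List.take_left]
        simpa using hmem
    simp only [specA, hrh]
    rw [extFrom_colF]
    rw [show (P.length : Int) + 1 = (((P ++ [r]).length : Nat) : Int) from by
      simp only [List.length_append, List.length_cons, List.length_nil]; push_cast; ring]
    apply ih (P ++ [r])
    intro k j hH
    refine h (1 + k) j ?_
    rw [show P ++ r :: rest = (P ++ [r]) ++ rest from by simp,
        show P.length + (1 + k) = (P ++ [r]).length + k from by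
          simp only [List.length_append, List.length_cons, List.length_nil]; omega]
    exact hH

theorem specA_hit (rest P R : List (List Char)) (i j : Nat) (c : Char)
    (hR : R = P ++ rest) (hfirst : IsFirst R i j)
    (hlow : ∀ i' j', Hit R i' j' → P.length ≤ i')
    (hc : cell R i j = some c) :
    specA (colF P) (P.length : Int) rest
      = [(myIdx (colF (R.take i) j) c : Int), (i : Int), (j : Int)] := by
  revert hR hlow hc
  induction rest generalizing P with
  | nil =>
    intro hR hlow hc
    exfalso
    have hlt := cell_lt R i j c hc
    have hge := hlow i j hfirst.1
    rw [hR] at hlt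
    simp only [List.length_append, List.length_nil] at hlt
    omega
  | cons r rest ih =>
    intro hR hlow hc
    cases hrh : rowHit (colF P) 0 r with
    | some p =>
      obtain ⟨j', c'⟩ := p
      obtain ⟨k, hj'k, hget, hmem, hmin⟩ := rowHit_some (colF P) r 0 j' c' hrh
      have hHit0 : Hit R P.length k := by
        rw [hR, hit_prefix_iff]
        exact ⟨c', by simpa using hget, by simpa using hmem⟩
      rcases hfirst.2 P.length k hHit0 with hlt | ⟨heq, hle⟩
      · exact absurd (hlow i j hfirst.1) (by omega)
      · have hc' : r[j]? = some c := by
          rw [heq, hR, cell_prefix] at hc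
          exact hc
        have hmemj : c ∈ colF P j := by
          obtain ⟨c2, hc2, hm2⟩ := hfirst.1
          have hcc : c2 = c := by rw [hc] at hc2; exact (Option.some_inj.mp hc2).symm
          subst hcc
          rw [heq, hR, List.take_left] at hm2
          exact hm2
        have hj : j = k := by
          by_contra hne
          have hjk2 : j < k := by omega
          exact (hmin j (by omega) c hc') (by simpa using hmemj)
        have hcceq : c' = c := by
          rw [hj] at hc'
          rw [hget] at hc'
          injection hc'
        simp only [specA, hrh]
        rw [show j' = j from by omega, hcceq, heq, hR, List.take_left]
    | none =>
      have hnorow : ∀ j'', ¬ Hit R P.length j'' := by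
        intro j'' hH
        rw [hR, hit_prefix_iff] at hH
        obtain ⟨c', hc'', hm'⟩ := hH
        exact (rowHit_none_iff _ _ _).mp hrh j'' c' hc'' (by simpa using hm')
      have hlow' : ∀ i' j'', Hit R i' j'' → (P ++ [r]).length ≤ i' := by
        intro i' j'' hH
        have h1 := hlow i' j'' hH
        have h2 : i' ≠ P.length := fun he => hnorow j'' (he ▸ hH)
        simp only [List.length_append, List.length_cons, List.length_nil]
        omega
      simp only [specA, hrh]
      rw [extFrom_colF]
      rw [show (P.length : Int) + 1 = (((P ++ [r]).length : Nat) : Int) from by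
        simp only [List.length_append, List.length_cons, List.length_nil]; push_cast; ring]
      exact ih (P ++ [r]) (by rw [hR]; simp) hlow' hc

-- ---- B side ----

theorem SeenRep_insert (L : List Char) (seen : PySem.Dict Char Nat)
    (hrep : SeenRep L seen) (c : Char) (hc : c ∉ L) :
    SeenRep (L ++ [c]) (seen.insert c L.length) := by
  intro ch
  rw [PySem.Dict.get?_insert]
  by_cases hch : ch = c
  · subst hch
    have := PySem.List.index?_append_singleton_self L ch hc
    rw [PySem.List.index?_eq_idxOf?] at this
    rw [if_pos rfl, this]
  · rw [if_neg hch, hrep ch]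
    by_cases hmem : ch ∈ L
    · have := PySem.List.index?_append_of_mem [c] hmem (v := ch)
      rw [PySem.List.index?_eq_idxOf?, PySem.List.index?_eq_idxOf?] at this
      rw [this]
    · have h1 : (L.idxOf? ch) = none := by
        rw [← PySem.List.index?_eq_idxOf?, PySem.List.index?_eq_none_iff]; exact hmem
      have h2 : ((L ++ [c]).idxOf? ch) = none := by
        rw [← PySem.List.index?_eq_idxOf?, PySem.List.index?_eq_none_iff]
        simp [hmem, Ne.symm, hch]
      rw [h1, h2]

theorem bCol_nohit (j : Nat) (rest P R : List (List Char)) (seen : PySem.Dict Char Nat)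
    (hR : R = P ++ rest) (hrep : SeenRep (colF P j) seen)
    (h : ∀ k, ¬ Hit R (P.length + k) j) :
    bCol j rest P.length seen (colF P j).length = none := by
  revert hR hrep h
  induction rest generalizing P seen with
  | nil => intro _ _ _; rfl
  | cons r rest ih =>
    intro hR hrep h
    have hR' : R = (P ++ [r]) ++ rest := by rw [hR]; simp
    have hlen1 : (P ++ [r]).length = P.length + 1 := by simp
    have hshift : ∀ k, ¬ Hit R ((P ++ [r]).length + k) j := by
      intro k hH
      apply h (1 + k)
      rw [show P.length + (1 + k) = (P ++ [r]).length + k from by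
        simp only [List.length_append, List.length_cons, List.length_nil]; omega]
      exact hH
    cases hrj : r[j]? with
    | none =>
      simp only [bCol, hrj]
      have hcol : colF (P ++ [r]) j = colF P j := by
        rw [colF_append_singleton, hrj]; simp
      have hrec := ih (P ++ [r]) seen hR' (by rw [hcol]; exact hrep) hshift
      rw [hlen1, hcol] at hrec
      exact hrec
    | some c =>
      have hnm : c ∉ colF P j := by
        intro hmem
        apply h 0
        rw [Nat.add_zero, hR, hit_prefix_iff]
        exact ⟨c, hrj, hmem⟩
      have hget : seen.get? c = none := by
        rw [hrep c, ← PySem.List.index?_eq_idxOf?, PySem.List.index?_eq_none_iff]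
        exact hnm
      simp only [bCol, hrj, hget]
      have hcol : colF (P ++ [r]) j = colF P j ++ [c] := by
        rw [colF_append_singleton, hrj]; rfl
      have hrep' : SeenRep (colF (P ++ [r]) j) (seen.insert c (colF P j).length) := by
        rw [hcol]; exact SeenRep_insert _ _ hrep c hnm
      have hrec := ih (P ++ [r]) _ hR' hrep' hshift
      rw [hlen1, hcol] at hrec
      simpa using hrec

theorem bCol_hit (j : Nat) (rest P R : List (List Char)) (seen : PySem.Dict Char Nat)
    (i : Nat) (c : Char)
    (hR : R = P ++ rest) (hrep : SeenRep (colF P j) seen)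
    (hhit : Hit R i j) (hmin : ∀ i' < i, ¬ Hit R i' j) (hge : P.length ≤ i)
    (hc : cell R i j = some c) :
    bCol j rest P.length seen (colF P j).length
      = some (i, myIdx (colF (R.take i) j) c) := by
  revert hR hrep hge hc
  induction rest generalizing P seen with
  | nil =>
    intro hR _ hge hc
    exfalso
    have hlt := cell_lt R i j c hc
    rw [hR] at hlt
    simp only [List.length_append, List.length_nil] at hlt
    omega
  | cons r rest ih =>
    intro hR hrep hge hc
    have hR' : R = (P ++ [r]) ++ rest := by rw [hR]; simp
    have hlen1 : (P ++ [r]).length = P.length + 1 := by simp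
    cases hrj : r[j]? with
    | none =>
      have hnot : ¬ Hit R P.length j := by
        rw [hR, hit_prefix_iff]
        rintro ⟨c', hc', -⟩
        rw [hrj] at hc'; cases hc'
      have hi : P.length + 1 ≤ i := by
        have : i ≠ P.length := fun he => hnot (he ▸ hhit)
        omega
      simp only [bCol, hrj]
      have hcol : colF (P ++ [r]) j = colF P j := by
        rw [colF_append_singleton, hrj]; simp
      have hrec := ih (P ++ [r]) seen hR' (by rw [hcol]; exact hrep) (by omega : (P ++ [r]).length ≤ i) hc
      rw [hlen1, hcol] at hrec
      exact hrec
    | some c0 =>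
      by_cases hmem : c0 ∈ colF P j
      · have hHit0 : Hit R P.length j := by
          rw [hR, hit_prefix_iff]
          exact ⟨c0, hrj, hmem⟩
        have hieq : i = P.length := by
          have h1 : ¬ P.length < i := fun hlt => hmin P.length hlt hHit0
          omega
        have hcc : c0 = c := by
          rw [hieq, hR, cell_prefix, hrj] at hc
          exact Option.some_inj.mp hc
        obtain ⟨p, hp⟩ : ∃ p, (colF P j).idxOf? c0 = some p := by
          cases hx : (colF P j).idxOf? c0 with
          | none =>
            exact absurd hmem (by rwa [← PySem.List.index?_eq_idxOf?, PySem.List.index?_eq_none_iff] at hx)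
          | some p => exact ⟨p, rfl⟩
        have hget : seen.get? c0 = some p := by rw [hrep c0, hp]
        simp only [bCol, hrj, hget]
        rw [hieq, hR, List.take_left]
        rw [show myIdx (colF P j) c = p from by unfold myIdx; rw [← hcc, hp]; rfl]
      · have hnot : ¬ Hit R P.length j := by
          rw [hR, hit_prefix_iff]
          rintro ⟨c', hc', hm'⟩
          rw [hrj] at hc'
          exact hmem ((Option.some_inj.mp hc') ▸ hm')
        have hi : P.length + 1 ≤ i := by
          have : i ≠ P.length := fun he => hnot (he ▸ hhit)
          omega
        have hget : seen.get? c0 = none := by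
          rw [hrep c0, ← PySem.List.index?_eq_idxOf?, PySem.List.index?_eq_none_iff]
          exact hmem
        simp only [bCol, hrj, hget]
        have hcol : colF (P ++ [r]) j = colF P j ++ [c0] := by
          rw [colF_append_singleton, hrj]; rfl
        have hrep' : SeenRep (colF (P ++ [r]) j) (seen.insert c0 (colF P j).length) := by
          rw [hcol]; exact SeenRep_insert _ _ hrep c0 hmem
        have hrec := ih (P ++ [r]) _ hR' hrep' (by omega : (P ++ [r]).length ≤ i) hc
        rw [hlen1, hcol] at hrec
        simpa using hrec

-- ---- the fold over columns ----

theorem bestFold_none (R : List (List Char)) (js : List Nat)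
    (h : ∀ j ∈ js, bCol j R 0 PySem.Dict.empty 0 = none) :
    js.foldl
      (fun best j =>
        match bCol j R 0 PySem.Dict.empty 0 with
        | none => best
        | some (i, p) =>
          match best with
          | none => some (i, j, p)
          | some (i0, _, _) => if i < i0 then some (i, j, p) else best)
      none = none := by
  induction js with
  | nil => rfl
  | cons j js ih =>
    have h0 := h j (by simp)
    simp only [List.foldl_cons, h0]
    exact ih (fun j' hj' => h j' (by simp [hj']))

theorem bestFold_pre (R : List (List Char)) (istar : Nat) (js : List Nat)
    (h : ∀ j ∈ js, ∀ i p, bCol j R 0 PySem.Dict.empty 0 = some (i, p) → istar < i)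
    (b : Option (Nat × Nat × Nat))
    (hb : b = none ∨ ∃ i j p, b = some (i, j, p) ∧ istar < i) :
    (js.foldl
      (fun best j =>
        match bCol j R 0 PySem.Dict.empty 0 with
        | none => best
        | some (i, p) =>
          match best with
          | none => some (i, j, p)
          | some (i0, _, _) => if i < i0 then some (i, j, p) else best)
      b) = none ∨
    ∃ i j p, (js.foldl
      (fun best j =>
        match bCol j R 0 PySem.Dict.empty 0 with
        | none => best
        | some (i, p) =>
          match best with
          | none => some (i, j, p)
          | some (i0, _, _) => if i < i0 then some (i, j, p) else best)
      b) = some (i, j, p) ∧ istar < i := by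
  revert h b hb
  induction js with
  | nil => intro _ b hb; exact hb
  | cons j js ih =>
    intro h b hb
    rw [List.foldl_cons]
    apply ih (fun j' hj' => h j' (by simp [hj']))
    rcases hb with rfl | ⟨i0, j0, p0, rfl, hlt0⟩
    · cases hcol : bCol j R 0 PySem.Dict.empty 0 with
      | none => left; simp
      | some q =>
        obtain ⟨i2, p2⟩ := q
        right; exact ⟨i2, j, p2, by simp, h j (by simp) i2 p2 hcol⟩
    · cases hcol : bCol j R 0 PySem.Dict.empty 0 with
      | none => right; exact ⟨i0, j0, p0, by simp, hlt0⟩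
      | some q =>
        obtain ⟨i2, p2⟩ := q
        by_cases hlt : i2 < i0
        · right; exact ⟨i2, j, p2, by simp [hlt], h j (by simp) i2 p2 hcol⟩
        · right; exact ⟨i0, j0, p0, by simp [hlt], hlt0⟩

theorem bestFold_post (R : List (List Char)) (istar jstar pstar : Nat) (js : List Nat)
    (h : ∀ j ∈ js, ∀ i p, bCol j R 0 PySem.Dict.empty 0 = some (i, p) → istar ≤ i) :
    js.foldl
      (fun best j =>
        match bCol j R 0 PySem.Dict.empty 0 with
        | none => best
        | some (i, p) =>
          match best with
          | none => some (i, j, p)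
          | some (i0, _, _) => if i < i0 then some (i, j, p) else best)
      (some (istar, jstar, pstar)) = some (istar, jstar, pstar) := by
  revert h
  induction js with
  | nil => intro _; rfl
  | cons j js ih =>
    intro h
    rw [List.foldl_cons]
    cases hcol : bCol j R 0 PySem.Dict.empty 0 with
    | none =>
      simp only []
      exact ih (fun j' hj' => h j' (by simp [hj']))
    | some q =>
      obtain ⟨i2, p2⟩ := q
      have hle := h j (by simp) i2 p2 hcol
      have hnl : ¬ i2 < istar := by omega
      simp only [hnl, if_false]
      exact ih (fun j' hj' => h j' (by simp [hj']))

theorem foldl_max_init_le (R : List (List Char)) (b : Nat) :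
    b ≤ R.foldl (fun m r => max m r.length) b := by
  induction R generalizing b with
  | nil => exact le_rfl
  | cons r2 R ih =>
    rw [List.foldl_cons]
    exact le_trans (le_max_left _ _) (ih _)

theorem length_le_foldl_max (R : List (List Char)) (r : List Char) (b : Nat)
    (hr : r ∈ R) : r.length ≤ R.foldl (fun m r => max m r.length) b := by
  revert hr
  induction R generalizing b with
  | nil => intro hr; cases hr
  | cons rr R ih =>
    intro hr
    rw [List.foldl_cons]
    rcases List.mem_cons.mp hr with rfl | hmem
    · exact le_trans (le_max_right _ _) (foldl_max_init_le R _)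
    · exact ih _ hmem

theorem exists_col_min (R : List (List Char)) (j : Nat) (h : ∃ i, Hit R i j) :
    ∃ i, Hit R i j ∧ ∀ i' < i, ¬ Hit R i' j := by
  obtain ⟨i, hi, hmin⟩ := wellFounded_lt.has_min {i | Hit R i j} h
  exact ⟨i, hi, fun i' hlt hh => hmin i' hh hlt⟩

theorem exists_first (R : List (List Char)) (h : ∃ i j, Hit R i j) :
    ∃ i j, IsFirst R i j := by
  obtain ⟨i, hi, hmini⟩ := wellFounded_lt.has_min {i | ∃ j, Hit R i j} h
  obtain ⟨j, hj, hminj⟩ := wellFounded_lt.has_min {j | Hit R i j} hi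
  refine ⟨i, j, hj, ?_⟩
  intro i' j' hij'
  by_cases he : i = i'
  · subst he
    exact Or.inr ⟨rfl, by have := hminj j' hij'; omega⟩
  · have h1 := hmini i' ⟨j', hij'⟩
    exact Or.inl (by omega)

theorem solution_eq_alt (S : List String) : solution S = solution_alt S := by
  cases S with
  | nil => rfl
  | cons s t =>
    have hA : solution (s :: t) = specA (colF []) 0 ((s :: t).map String.toList) := by
      unfold solution
      exact aRows_spec (s :: t) (colF []) PySem.Dict.empty 0 DicRep_empty
    set R := (s :: t).map String.toList with hRdef
    set w := R.foldl (fun m r => max m r.length) 0 with hwdef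
    have hBdef : solution_alt (s :: t) = (match bBest R w with
      | none => ([] : List Int)
      | some (i, j, p) => [(p : Int), (i : Int), (j : Int)]) := rfl
    by_cases hex : ∃ i j, Hit R i j
    · obtain ⟨i0, j0, hfirst⟩ := exists_first R hex
      obtain ⟨c, hc, hmemc⟩ := hfirst.1
      have hAval : solution (s :: t) = [(myIdx (colF (R.take i0) j0) c : Int), (i0 : Int), (j0 : Int)] := by
        rw [hA]
        have := specA_hit R [] R i0 j0 c (by simp) hfirst (fun i' j' _ => Nat.zero_le _) hc
        simpa using this
      obtain ⟨r0, hr0⟩ : ∃ r0, R[i0]? = some r0 := by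
        unfold cell at hc
        cases hg : R[i0]? with
        | none => rw [hg] at hc; cases hc
        | some r0 => exact ⟨r0, rfl⟩
      have hr0j : r0[j0]? = some c := by
        unfold cell at hc
        rw [hr0] at hc
        simpa using hc
      have hj0w : j0 < w := by
        have h1 : j0 < r0.length := by
          by_contra hge
          rw [List.getElem?_eq_none (by omega)] at hr0j
          cases hr0j
        have h2 : r0.length ≤ w := length_le_foldl_max R r0 0 (List.mem_of_getElem? hr0)
        omega
      have hminCol : ∀ i' < i0, ¬ Hit R i' j0 := by
        intro i' hlt hH
        rcases hfirst.2 i' j0 hH with h1 | ⟨h1, -⟩ <;> omega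
      set p0 := myIdx (colF (R.take i0) j0) c with hp0
      have hcolj0 : bCol j0 R 0 PySem.Dict.empty 0 = some (i0, p0) := by
        have hB := bCol_hit j0 R [] R PySem.Dict.empty i0 c rfl (fun ch => by simp [colF])
          hfirst.1 hminCol (Nat.zero_le _) hc
        simp only [List.length_nil, colF, List.filterMap_nil] at hB
        exact hB
      have hpre : ∀ j ∈ List.range j0, ∀ i p,
          bCol j R 0 PySem.Dict.empty 0 = some (i, p) → i0 < i := by
        intro j hj i p hcol
        have hjlt : j < j0 := List.mem_range.mp hj
        by_cases hcex : ∃ i2, Hit R i2 j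
        · obtain ⟨im, him, himin⟩ := exists_col_min R j hcex
          obtain ⟨cm, hcm, -⟩ := id him
          have hB := bCol_hit j R [] R PySem.Dict.empty im cm rfl (fun ch => by simp [colF])
            him himin (Nat.zero_le _) hcm
          simp only [List.length_nil, colF, List.filterMap_nil] at hB
          rw [hcol] at hB
          have hieq : i = im := by
            have := Option.some_inj.mp hB
            exact congrArg Prod.fst this
          rcases hfirst.2 im j him with h1 | ⟨h1, h2⟩ <;> omega
        · have hnone : bCol j R 0 PySem.Dict.empty 0 = none := by
            have hB := bCol_nohit j R [] R PySem.Dict.empty rfl (fun ch => by simp [colF])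
              (fun k hH => hcex ⟨0 + k, hH⟩)
            simp only [List.length_nil, colF, List.filterMap_nil] at hB
            exact hB
          rw [hnone] at hcol
          cases hcol
      have hpost : ∀ j ∈ (List.range (w - (j0 + 1))).map (fun x => (j0 + 1) + x), ∀ i p,
          bCol j R 0 PySem.Dict.empty 0 = some (i, p) → i0 ≤ i := by
        intro j hj i p hcol
        obtain ⟨x, -, rfl⟩ := List.mem_map.mp hj
        by_cases hcex : ∃ i2, Hit R i2 ((j0 + 1) + x)
        · obtain ⟨im, him, himin⟩ := exists_col_min R ((j0 + 1) + x) hcex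
          obtain ⟨cm, hcm, -⟩ := id him
          have hB := bCol_hit ((j0 + 1) + x) R [] R PySem.Dict.empty im cm rfl (fun ch => by simp [colF])
            him himin (Nat.zero_le _) hcm
          simp only [List.length_nil, colF, List.filterMap_nil] at hB
          rw [hcol] at hB
          have hieq : i = im := by
            have := Option.some_inj.mp hB
            exact congrArg Prod.fst this
          rcases hfirst.2 im ((j0 + 1) + x) him with h1 | ⟨h1, -⟩ <;> omega
        · have hnone : bCol ((j0 + 1) + x) R 0 PySem.Dict.empty 0 = none := by
            have hB := bCol_nohit ((j0 + 1) + x) R [] R PySem.Dict.empty rfl (fun ch => by simp [colF])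
              (fun k hH => hcex ⟨0 + k, hH⟩)
            simp only [List.length_nil, colF, List.filterMap_nil] at hB
            exact hB
          rw [hnone] at hcol
          cases hcol
      have hsplit : List.range w = (List.range j0 ++ [j0]) ++ (List.range (w - (j0 + 1))).map (fun x => (j0 + 1) + x) := by
        have he : w = (j0 + 1) + (w - (j0 + 1)) := by omega
        conv_lhs => rw [he, List.range_add]
        rw [List.range_succ]
      have hbb : bBest R w = some (i0, j0, p0) := by
        unfold bBest
        rw [hsplit, List.foldl_append, List.foldl_append]
        rcases bestFold_pre R i0 (List.range j0) hpre none (Or.inl rfl) with hn | ⟨i1, j1, p1, hsome, hlt1⟩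
        · rw [hn]
          simp only [List.foldl_cons, List.foldl_nil, hcolj0]
          exact bestFold_post R i0 j0 p0 _ hpost
        · rw [hsome]
          simp only [List.foldl_cons, List.foldl_nil, hcolj0, hlt1, if_true]
          exact bestFold_post R i0 j0 p0 _ hpost
      rw [hAval, hBdef, hbb]
    · have hAval : solution (s :: t) = [] := by
        rw [hA]
        have := specA_nohit R [] (fun k j hH => hex ⟨0 + k, j, hH⟩)
        simpa using this
      have hBnone : bBest R w = none := by
        unfold bBest
        apply bestFold_none
        intro j hj
        have hB := bCol_nohit j R [] R PySem.Dict.empty rfl (fun ch => by simp [colF])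
          (fun k hH => hex ⟨0 + k, j, hH⟩)
        simp only [List.length_nil, colF, List.filterMap_nil] at hB
        exact hB
      rw [hAval, hBdef, hBnone]

-- ===== VERDICT (by name: the statement is the Claim_ definition above) =====
theorem solution_spec : Claim_equal_solution := by
  intro S _
  unfold Spec_solution
  exact solution_eq_alt S
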